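-- pv_equiv track=rewrite | github.com/danieledge/DataK9 | validation_framework/profiler/analysis_utils.py | _convert_pattern_to_regex
-- ===== SOURCE A (Python) =====
-- def _convert_pattern_to_regex(pattern: str) -> str:
--     """
--     Convert pattern template (AAA-999) to regex pattern.
--
--     Args:
--         pattern: Pattern string with A=letter, 9=digit
--
--     Returns:
--         Regex pattern string
--     """
--     regex_parts = []
--     i = 0
--     while i < len(pattern):
--         char = pattern[i]
--         if char == 'A':
--             # Count consecutive A's
--             count = 1
--             while i + count < len(pattern) and pattern[i + count] == 'A':
--                 count += 1
--             regex_parts.append(f'[a-zA-Z]{{{count}}}')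
--             i += count
--         elif char == '9':
--             # Count consecutive 9's
--             count = 1
--             while i + count < len(pattern) and pattern[i + count] == '9':
--                 count += 1
--             regex_parts.append(f'\\d{{{count}}}')
--             i += count
--         else:
--             # Literal character - escape if special
--             if char in r'\.^$*+?{}[]()|\-':
--                 regex_parts.append('\\' + char)
--             else:
--                 regex_parts.append(char)
--             i += 1
--
--     return '^' + ''.join(regex_parts) + '$'
-- ===== SOURCE B (Python) =====
-- def _convert_pattern_to_regex(pattern: str) -> str:
--     # Run-length encode the pattern first, then map each run to its regex part.
--     runs = []
--     for c in pattern: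
--         if runs and runs[-1][0] == c:
--             runs[-1][1] += 1
--         else:
--             runs.append([c, 1])
--     parts = []
--     for c, n in runs:
--         if c == 'A':
--             parts.append(f'[a-zA-Z]{{{n}}}')
--         elif c == '9':
--             parts.append(f'\\d{{{n}}}')
--         else:
--             esc = '\\' + c if c in '\\.^$*+?{}[]()|-' else c
--             parts.append(esc * n)
--     return '^' + ''.join(parts) + '$'
-- ===== Notes on version B (the rewrite author's own statement) =====
-- stated objective: simpler
-- what changed: Replaces A's manual index-based outer while loop with nested lookahead while loops by a two-phase decomposition: one pass run-length encodes the pattern into (char, count) runs, then each run is mapped independently to its regex part (literal runs via string repetition of the escaped character).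
import Mathlib
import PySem

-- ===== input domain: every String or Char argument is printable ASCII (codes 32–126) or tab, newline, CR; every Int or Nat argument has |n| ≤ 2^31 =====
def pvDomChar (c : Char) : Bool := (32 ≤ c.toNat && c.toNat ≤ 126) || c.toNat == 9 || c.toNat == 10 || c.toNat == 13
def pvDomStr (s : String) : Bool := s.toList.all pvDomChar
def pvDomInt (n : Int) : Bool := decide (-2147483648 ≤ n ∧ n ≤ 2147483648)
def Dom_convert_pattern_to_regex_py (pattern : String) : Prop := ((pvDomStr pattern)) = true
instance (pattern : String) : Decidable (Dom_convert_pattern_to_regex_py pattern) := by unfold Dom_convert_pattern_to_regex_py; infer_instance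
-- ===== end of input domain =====

-- B replaces A's manual shared-index nested while loops by run-length encoding the
-- pattern once and mapping each run to its regex part (objective: simpler decomposition).

-- ===== PORT A =====
-- the raw string r'\.^$*+?{}[]()|\-' as its character list (backslash occurs twice, as in A)
def pvSpecialsA : List Char :=
  ['\\', '.', '^', '$', '*', '+', '?', '{', '}', '[', ']', '(', ')', '|', '\\', '-']

-- count of consecutive leading occurrences of c (A's inner 'while pattern[i+count] == char')
def pvLeadCount (c : Char) : List Char → Nat
  | [] => 0
  | x :: xs => if x = c then pvLeadCount c xs + 1 else 0

-- A's outer while loop: at index i, look at the char, count its run (for 'A'/'9') and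
-- advance by the run; literal chars are handled one at a time. The remaining suffix
-- pattern[i:] is the recursion argument; parts are strings (as char lists).
def pvConvA : List Char → List (List Char)
  | [] => []
  | c :: rest =>
    if c = 'A' then
      let count := 1 + pvLeadCount 'A' rest
      ("[a-zA-Z]{".toList ++ PySem.Int.toChars (count : Int) ++ ['}'])
        :: pvConvA (rest.drop (count - 1))
    else if c = '9' then
      let count := 1 + pvLeadCount '9' rest
      ("\\d{".toList ++ PySem.Int.toChars (count : Int) ++ ['}'])
        :: pvConvA (rest.drop (count - 1))
    else
      (if c ∈ pvSpecialsA then ['\\', c] else [c]) :: pvConvA rest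
termination_by l => l.length
decreasing_by all_goals (simp; try omega)

def convert_pattern_to_regex_py (pattern : String) : String :=
  String.ofList ('^' :: (pvConvA pattern.toList).flatten ++ ['$'])

-- ===== PORT B =====
def pvSpecialsB : List Char :=
  ['\\', '.', '^', '$', '*', '+', '?', '{', '}', '[', ']', '(', ')', '|', '-']

-- one step of B's first loop: extend the last run or start a new one (runs[-1] update)
def pvPushChar : List (Char × Nat) → Char → List (Char × Nat)
  | [], c => [(c, 1)]
  | (d, n) :: rs, c =>
    if rs.isEmpty then (if d = c then [(d, n + 1)] else [(d, n), (c, 1)])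
    else (d, n) :: pvPushChar rs c

-- B's second loop body: one run to its regex part
def pvPartOf : Char × Nat → List Char
  | (c, n) =>
    if c = 'A' then "[a-zA-Z]{".toList ++ PySem.Int.toChars (n : Int) ++ ['}']
    else if c = '9' then "\\d{".toList ++ PySem.Int.toChars (n : Int) ++ ['}']
    else (List.replicate n (if c ∈ pvSpecialsB then ['\\', c] else [c])).flatten

def convert_pattern_to_regex_py_alt (pattern : String) : String :=
  String.ofList ('^' :: ((pattern.toList.foldl pvPushChar []).map pvPartOf).flatten ++ ['$'])

-- ===== PRECONDITION & SPEC =====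
def Spec_convert_pattern_to_regex_py (pattern : String) (out : String) : Prop := out = convert_pattern_to_regex_py_alt pattern
instance (pattern : String) (out : String) : Decidable (Spec_convert_pattern_to_regex_py pattern out) := by unfold Spec_convert_pattern_to_regex_py; infer_instance

-- ===== CLAIM (what is proved, stated in full; the proofs are below) =====
def Claim_equal_convert_pattern_to_regex_py : Prop := ∀ (pattern : String), Dom_convert_pattern_to_regex_py pattern → Spec_convert_pattern_to_regex_py pattern (convert_pattern_to_regex_py pattern)

-- ===== LEMMAS AND PROOFS =====

-- unfolding equations for pvConvA
theorem pvConvA_A (rest : List Char) :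
    pvConvA ('A' :: rest)
      = ("[a-zA-Z]{".toList ++ PySem.Int.toChars ((1 + pvLeadCount 'A' rest : Nat) : Int) ++ ['}'])
        :: pvConvA (rest.drop (pvLeadCount 'A' rest)) := by
  rw [pvConvA]
  simp

theorem pvConvA_9 (rest : List Char) :
    pvConvA ('9' :: rest)
      = ("\\d{".toList ++ PySem.Int.toChars ((1 + pvLeadCount '9' rest : Nat) : Int) ++ ['}'])
        :: pvConvA (rest.drop (pvLeadCount '9' rest)) := by
  rw [pvConvA]
  simp

theorem pvConvA_lit (c : Char) (rest : List Char) (hA : ¬ c = 'A') (h9 : ¬ c = '9') :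
    pvConvA (c :: rest)
      = (if c ∈ pvSpecialsA then ['\\', c] else [c]) :: pvConvA rest := by
  rw [pvConvA]
  simp [hA, h9]

-- pushing into a list with a nonempty prefix only touches the tail
theorem pvPushChar_append (rs : List (Char × Nat)) (p : Char × Nat) (c : Char) :
    pvPushChar (rs ++ [p]) c = rs ++ pvPushChar [p] c := by
  induction rs with
  | nil => rfl
  | cons r rs ih =>
    obtain ⟨d, n⟩ := r
    simp [pvPushChar, ih]

theorem pvFoldl_pushChar_append (l : List Char) (rs : List (Char × Nat)) (p : Char × Nat) :
    List.foldl pvPushChar (rs ++ [p]) l = rs ++ List.foldl pvPushChar [p] l := by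
  induction l generalizing rs p with
  | nil => rfl
  | cons c t ih =>
    obtain ⟨d, n⟩ := p
    by_cases h : d = c
    · simp only [List.foldl_cons, pvPushChar_append, pvPushChar, h, List.isEmpty_nil,
        if_true]
      exact ih rs (c, n + 1)
    · simp only [List.foldl_cons, pvPushChar_append, pvPushChar, List.isEmpty_nil,
        if_true, if_neg h]
      have h1 : rs ++ [(d, n), (c, 1)] = (rs ++ [(d, n)]) ++ [(c, 1)] := by simp
      rw [h1, ih (rs ++ [(d, n)]) (c, 1),
        show ([(d, n), (c, 1)] : List (Char × Nat)) = [(d, n)] ++ [(c, 1)] from rfl,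
        ih [(d, n)] (c, 1)]
      simp

-- absorbing a block of equal characters into the current run
theorem pvFoldl_pushChar_run (k : Nat) (c : Char) (n : Nat) (l : List Char) :
    List.foldl pvPushChar [(c, n)] (List.replicate k c ++ l)
      = List.foldl pvPushChar [(c, n + k)] l := by
  induction k generalizing n with
  | zero => simp
  | succ k ih =>
    simp only [List.replicate_succ, List.cons_append, List.foldl_cons]
    rw [show pvPushChar [(c, n)] c = [(c, n + 1)] from by simp [pvPushChar], ih (n + 1),
      show n + 1 + k = n + (k + 1) from by omega]

-- the first run of the rle of c :: (c^k ++ l), head of l ≠ c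
theorem pvRle_cons (c : Char) (k : Nat) (l : List Char) (h : l.head? ≠ some c) :
    List.foldl pvPushChar [] (c :: (List.replicate k c ++ l))
      = (c, k + 1) :: List.foldl pvPushChar [] l := by
  simp only [List.foldl_cons]
  rw [show pvPushChar [] c = [(c, 1)] from rfl, pvFoldl_pushChar_run k c 1 l,
    show 1 + k = k + 1 from by omega]
  cases l with
  | nil => rfl
  | cons d t =>
    have hdc : ¬ c = d := by intro hh; simp [hh] at h
    simp only [List.foldl_cons]
    rw [show pvPushChar [(c, k + 1)] d = [(c, k + 1), (d, 1)] from by simp [pvPushChar, hdc],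
      show ([(c, k + 1), (d, 1)] : List (Char × Nat)) = [(c, k + 1)] ++ [(d, 1)] from rfl,
      pvFoldl_pushChar_append t [(c, k + 1)] (d, 1)]
    rfl

theorem pvLeadCount_decomp (c : Char) (l : List Char) :
    List.replicate (pvLeadCount c l) c ++ l.drop (pvLeadCount c l) = l := by
  induction l with
  | nil => simp [pvLeadCount]
  | cons x xs ih =>
    by_cases h : x = c
    · simp [pvLeadCount, h, List.replicate_succ, ih]
    · simp [pvLeadCount, h]

theorem pvLeadCount_drop_head (c : Char) (l : List Char) :
    (l.drop (pvLeadCount c l)).head? ≠ some c := by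
  induction l with
  | nil => simp [pvLeadCount]
  | cons x xs ih =>
    by_cases h : x = c
    · simpa [pvLeadCount, h] using ih
    · simp [pvLeadCount, h, List.head?]

-- rle of the whole list starts with the full first run
theorem pvRle_head (c : Char) (rest : List Char) :
    List.foldl pvPushChar [] (c :: rest)
      = (c, pvLeadCount c rest + 1) :: List.foldl pvPushChar [] (rest.drop (pvLeadCount c rest)) := by
  conv_lhs => rw [show c :: rest = c :: (List.replicate (pvLeadCount c rest) c ++ rest.drop (pvLeadCount c rest)) from by rw [pvLeadCount_decomp]]
  exact pvRle_cons c (pvLeadCount c rest) _ (pvLeadCount_drop_head c rest)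

-- the literal-character step on B's side: consuming one literal char prepends its escape
theorem pvLitStep (c : Char) (rest : List Char) (hA : ¬ c = 'A') (h9 : ¬ c = '9') :
    ((List.foldl pvPushChar [] (c :: rest)).map pvPartOf).flatten
      = (if c ∈ pvSpecialsB then ['\\', c] else [c])
        ++ ((List.foldl pvPushChar [] rest).map pvPartOf).flatten := by
  rw [pvRle_head c rest]
  cases hk : pvLeadCount c rest with
  | zero =>
    have hrest : rest.drop 0 = rest := by simp
    rw [hrest]
    simp [pvPartOf, hA, h9]
  | succ m =>
    have hdecomp := pvLeadCount_decomp c rest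
    rw [hk] at hdecomp
    have hhead := pvLeadCount_drop_head c rest
    rw [hk] at hhead
    conv_rhs => rw [show rest = c :: (List.replicate m c ++ rest.drop (m + 1)) from by
      rw [← hdecomp]; simp [List.replicate_succ]]
    rw [pvRle_cons c m _ (by simpa using hhead)]
    simp [pvPartOf, hA, h9, List.replicate_succ]

-- main equivalence on char lists
theorem pvMain (l : List Char) :
    (pvConvA l).flatten = ((List.foldl pvPushChar [] l).map pvPartOf).flatten := by
  match l with
  | [] => simp [pvConvA]
  | c :: rest =>
    by_cases hA : c = 'A'
    · subst hA
      rw [pvConvA_A, pvRle_head 'A' rest]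
      simp only [List.flatten_cons, List.map_cons, pvPartOf,
        show (1 + pvLeadCount 'A' rest : Nat) = pvLeadCount 'A' rest + 1 from by omega]
      rw [pvMain (rest.drop (pvLeadCount 'A' rest))]
      simp
    · by_cases h9 : c = '9'
      · subst h9
        rw [pvConvA_9, pvRle_head '9' rest]
        simp only [List.flatten_cons, List.map_cons, pvPartOf,
          show (1 + pvLeadCount '9' rest : Nat) = pvLeadCount '9' rest + 1 from by omega]
        rw [pvMain (rest.drop (pvLeadCount '9' rest))]
        simp
      · have hmem : c ∈ pvSpecialsA ↔ c ∈ pvSpecialsB := by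
          simp [pvSpecialsA, pvSpecialsB]; tauto
        rw [pvConvA_lit c rest hA h9, pvLitStep c rest hA h9]
        simp only [List.flatten_cons]
        rw [pvMain rest]
        by_cases hs : c ∈ pvSpecialsB
        · rw [if_pos hs, if_pos (hmem.mpr hs)]
        · rw [if_neg hs, if_neg (fun hh => hs (hmem.mp hh))]
termination_by l.length
decreasing_by all_goals simp

-- ===== VERDICT (by name: the statement is the Claim_ definition above) =====
theorem convert_pattern_to_regex_py_spec : Claim_equal_convert_pattern_to_regex_py := by
  intro pattern _
  unfold Spec_convert_pattern_to_regex_py convert_pattern_to_regex_py convert_pattern_to_regex_py_alt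
  rw [pvMain]
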